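-- pv_equiv track=rewrite | github.com/Global-ASFV-Research-Alliance/VirusPPIScreen | pMSA/old_scripts/paired_unpaired_MSA_virus.py | pMSA_paired_and_unpaired
-- ===== SOURCE A (Python) =====
-- def pMSA_paired_and_unpaired(dict1, dict2, querylen1, querylen2):
-- #builds a pMSA dict from two dictionaries of single MSAs {code:[lab,seq]}. Paires based on common keys
-- #Alignments must be in FASTA format
-- #concatinates lab for new lab, and seqs for new seq
-- #if label unique to dict1 or dict2 it adds it with the corresponding gaps according to querylen1 and querylen2 length
--     pMSA = {}
--     for code in dict1:
--         if code in dict2: #pair and concatinate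
--             pMSA[code] = [dict1[code][0]+'__'+dict2[code][0], dict1[code][1]+dict2[code][1]]
--         else: # add gaps for peptide 2
--             pMSA[code] = [f"{dict1[code][0]}__", f"{dict1[code][1]}{'-' * querylen2}"]
--     for code in dict2:
--         if code not in dict1: #add gaps for peptide 1
--             pMSA[code] = [f"__{dict2[code][0]}", f"{'-' * querylen1}{dict2[code][1]}"]
--     return pMSA
-- ===== SOURCE B (Python) =====
-- def pMSA_paired_and_unpaired(dict1, dict2, querylen1, querylen2):
--     # Seed-and-patch: enter every dict1 entry as provisionally unpaired, then fold
--     # dict2 into the accumulator, upgrading a seeded entry to a paired one (slicing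
--     # off the provisional gap) or appending a gap-left entry for a dict2-only key.
--     gap1, gap2 = '-' * querylen1, '-' * querylen2
--     pMSA = {c: [v[0] + '__', v[1] + gap2] for c, v in dict1.items()}
--     for c, v in dict2.items():
--         prev = pMSA.get(c)
--         if prev is None:
--             pMSA[c] = ['__' + v[0], gap1 + v[1]]
--         else:
--             pMSA[c] = [prev[0] + v[0], prev[1][:len(prev[1]) - len(gap2)] + v[1]]
--     return pMSA
-- ===== Notes on version B (the rewrite author's own statement) =====
-- stated objective: alternative
-- what changed: Instead of A's two loops that each test membership in the other dict and rebuild every entry from both dicts, B seeds the accumulator with all dict1 entries as provisionally unpaired (label+'__', seq+gap2) and then makes one upsert fold over dict2 that patches a seeded entry in place (slicing the provisional gap back off) or appends a gap-left entry.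
import Mathlib
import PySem

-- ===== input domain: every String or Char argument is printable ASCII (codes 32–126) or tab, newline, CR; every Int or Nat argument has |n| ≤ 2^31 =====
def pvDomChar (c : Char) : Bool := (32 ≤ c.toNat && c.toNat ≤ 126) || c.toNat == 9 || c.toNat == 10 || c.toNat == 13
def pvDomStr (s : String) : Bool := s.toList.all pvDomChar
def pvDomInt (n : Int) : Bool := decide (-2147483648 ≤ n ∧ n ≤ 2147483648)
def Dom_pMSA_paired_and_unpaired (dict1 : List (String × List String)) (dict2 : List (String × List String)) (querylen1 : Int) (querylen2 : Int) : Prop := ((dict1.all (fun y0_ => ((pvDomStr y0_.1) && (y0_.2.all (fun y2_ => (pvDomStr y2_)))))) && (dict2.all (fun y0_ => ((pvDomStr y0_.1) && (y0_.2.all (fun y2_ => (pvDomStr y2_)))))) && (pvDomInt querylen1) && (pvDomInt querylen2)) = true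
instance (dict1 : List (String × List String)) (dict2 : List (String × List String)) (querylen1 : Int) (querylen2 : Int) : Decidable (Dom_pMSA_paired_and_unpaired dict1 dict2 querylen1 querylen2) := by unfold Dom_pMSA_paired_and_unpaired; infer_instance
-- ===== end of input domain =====

-- B replaces A's two dict1/dict2-membership-tested rebuild loops by seed-and-patch: every
-- dict1 entry is seeded as provisionally unpaired, then one fold over dict2 upserts into the
-- accumulator, slicing the provisional gap back off when a partner arrives — same cost.

-- shared primitive: Python's '-' * n on a string (empty for n ≤ 0)
def pvStrTimes (s : String) (n : Int) : String := String.ofList (PySem.List.pyRepeat s.toList n)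

-- ===== PORT A =====
def pMSA_paired_and_unpaired (dict1 : List (String × List String)) (dict2 : List (String × List String)) (querylen1 : Int) (querylen2 : Int) : List (String × List String) :=
  let d1 := PySem.Dict.ofList dict1
  let d2 := PySem.Dict.ofList dict2
  let m1 := d1.keys.foldl (fun (pMSA : PySem.Dict String (List String)) code =>
      if d2.contains code then
        pMSA.insert code
          [PySem.List.pyGetD (d1.getD code []) 0 "" ++ "__" ++ PySem.List.pyGetD (d2.getD code []) 0 "",
           PySem.List.pyGetD (d1.getD code []) 1 "" ++ PySem.List.pyGetD (d2.getD code []) 1 ""]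
      else
        pMSA.insert code
          [PySem.List.pyGetD (d1.getD code []) 0 "" ++ "__",
           PySem.List.pyGetD (d1.getD code []) 1 "" ++ pvStrTimes "-" querylen2])
    PySem.Dict.empty
  let m2 := d2.keys.foldl (fun pMSA code =>
      if !d1.contains code then
        pMSA.insert code
          ["__" ++ PySem.List.pyGetD (d2.getD code []) 0 "",
           pvStrTimes "-" querylen1 ++ PySem.List.pyGetD (d2.getD code []) 1 ""]
      else pMSA)
    m1
  m2.items

-- ===== PORT B =====
-- prev[1][:len(prev[1]) - len(gap)]  — Python slice, exact (PySem.List.slice)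
def pvTrim (s : String) (gap : String) : String :=
  String.ofList (PySem.List.slice s.toList none (some (PySem.Str.len s - PySem.Str.len gap)))

def pMSA_paired_and_unpaired_alt (dict1 : List (String × List String)) (dict2 : List (String × List String)) (querylen1 : Int) (querylen2 : Int) : List (String × List String) :=
  let d1 := PySem.Dict.ofList dict1
  let d2 := PySem.Dict.ofList dict2
  let gap1 := pvStrTimes "-" querylen1
  let gap2 := pvStrTimes "-" querylen2
  -- seed: dict comprehension over dict1.items()
  let seeded := PySem.Dict.ofList (d1.items.map (fun p =>
      (p.1, [PySem.List.pyGetD p.2 0 "" ++ "__", PySem.List.pyGetD p.2 1 "" ++ gap2])))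
  -- patch: one fold over dict2.items(), upsert with prev = pMSA.get(c)
  let final := d2.items.foldl (fun (pMSA : PySem.Dict String (List String)) p =>
      match pMSA.get? p.1 with
      | none => pMSA.insert p.1
          ["__" ++ PySem.List.pyGetD p.2 0 "", gap1 ++ PySem.List.pyGetD p.2 1 ""]
      | some prev => pMSA.insert p.1
          [PySem.List.pyGetD prev 0 "" ++ PySem.List.pyGetD p.2 0 "",
           pvTrim (PySem.List.pyGetD prev 1 "") gap2 ++ PySem.List.pyGetD p.2 1 ""])
    seeded
  final.items

-- ===== PRECONDITION & SPEC =====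
-- Pre_ excludes exactly the inputs where Python A raises IndexError: a value list of the
-- (deduplicated) dicts with fewer than 2 elements is indexed at [0]/[1].
def Pre_pMSA_paired_and_unpaired (dict1 : List (String × List String)) (dict2 : List (String × List String)) (querylen1 : Int) (querylen2 : Int) : Prop :=
  (∀ v ∈ (PySem.Dict.ofList dict1).values, 2 ≤ v.length) ∧
  (∀ v ∈ (PySem.Dict.ofList dict2).values, 2 ≤ v.length)
instance (dict1 : List (String × List String)) (dict2 : List (String × List String)) (querylen1 : Int) (querylen2 : Int) : Decidable (Pre_pMSA_paired_and_unpaired dict1 dict2 querylen1 querylen2) := by unfold Pre_pMSA_paired_and_unpaired; infer_instance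
def pvWitness_pMSA_paired_and_unpaired : (List (String × List String)) × (List (String × List String)) × Int × Int :=
  ([("a", ["La", "AAA"]), ("c", ["Lc", "CCC"])], [("b", ["Lb", "BB"]), ("c", ["Mc", "DD"])], 2, 3)

def Spec_pMSA_paired_and_unpaired (dict1 : List (String × List String)) (dict2 : List (String × List String)) (querylen1 : Int) (querylen2 : Int) (out : List (String × List String)) : Prop := out = pMSA_paired_and_unpaired_alt dict1 dict2 querylen1 querylen2
instance (dict1 : List (String × List String)) (dict2 : List (String × List String)) (querylen1 : Int) (querylen2 : Int) (out : List (String × List String)) : Decidable (Spec_pMSA_paired_and_unpaired dict1 dict2 querylen1 querylen2 out) := by unfold Spec_pMSA_paired_and_unpaired; infer_instance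

-- ===== CLAIM =====
def Claim_equal_pMSA_paired_and_unpaired : Prop := ∀ (dict1 : List (String × List String)) (dict2 : List (String × List String)) (querylen1 : Int) (querylen2 : Int), Dom_pMSA_paired_and_unpaired dict1 dict2 querylen1 querylen2 → Pre_pMSA_paired_and_unpaired dict1 dict2 querylen1 querylen2 → Spec_pMSA_paired_and_unpaired dict1 dict2 querylen1 querylen2 (pMSA_paired_and_unpaired dict1 dict2 querylen1 querylen2)

-- ===== LEMMAS AND PROOFS =====

-- slicing the appended gap back off restores the original string
theorem pvTrim_append (a gap : String) : pvTrim (a ++ gap) gap = a := by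
  unfold pvTrim
  have hlen : PySem.Str.len (a ++ gap) - PySem.Str.len gap = ((a.toList.length : Nat) : Int) := by
    rw [PySem.Str.len_eq, PySem.Str.len_eq, String.toList_append]
    simp
  rw [hlen, PySem.List.slice_to_natCast, String.toList_append, List.take_left,
    String.ofList_toList]

theorem pvItems_update_fresh (d : PySem.Dict String (List String)) (ps : List (String × List String))
    (h : ∀ p ∈ ps, d.contains p.1 = false) (hnd : (ps.map (·.1)).Nodup) :
    (d.update ps).items = d.items ++ ps := by
  have := PySem.Dict.items_foldl_insert_fresh (l := ps) (k := fun p => p.1) (v := fun p => p.2)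
      (d := d) h hnd
  simpa [PySem.Dict.update] using this

theorem pvItems_ofList_nodup (ps : List (String × List String)) (hnd : (ps.map (·.1)).Nodup) :
    (PySem.Dict.ofList ps).items = ps := by
  rw [PySem.Dict.ofList, pvItems_update_fresh _ _ (by simp) hnd]
  rfl

-- the seed-and-patch upsert loop, characterised: existing items are patched in place by the
-- unique matching pair of ps, fresh keys of ps are appended
theorem pvFoldUpsert (g : List String → String × List String → List String)
    (h0 : String × List String → List String)
    (ps : List (String × List String)) (m : PySem.Dict String (List String))
    (hm : m.keys.Nodup) (hp : (ps.map (·.1)).Nodup) :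
    (ps.foldl (fun (pMSA : PySem.Dict String (List String)) p =>
        match pMSA.get? p.1 with
        | none => pMSA.insert p.1 (h0 p)
        | some prev => pMSA.insert p.1 (g prev p)) m).items
    = m.items.map (fun q =>
        match ps.find? (fun p => p.1 == q.1) with
        | some p => (q.1, g q.2 p)
        | none => q)
      ++ (ps.filter (fun p => !m.contains p.1)).map (fun p => (p.1, h0 p)) := by
  induction ps generalizing m with
  | nil => simp
  | cons p rest ih =>
    have hpr : (rest.map (·.1)).Nodup := (List.nodup_cons.mp hp).2
    have hpnotin : p.1 ∉ rest.map (·.1) := (List.nodup_cons.mp hp).1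
    have hrfind : rest.find? (fun r => r.1 == p.1) = none := by
      rw [List.find?_eq_none]
      intro r hr
      simp only [beq_iff_eq]
      intro hcon
      exact hpnotin (hcon ▸ List.mem_map_of_mem hr)
    rw [List.foldl_cons]
    cases hget : m.get? p.1 with
    | some prev =>
      have hcon : m.contains p.1 = true := by
        rw [PySem.Dict.contains_eq_isSome_get?, hget]; rfl
      simp only [hget]
      rw [ih (m.insert p.1 (g prev p)) (PySem.Dict.nodup_keys_insert m p.1 _ hm) hpr]
      rw [PySem.Dict.items_insert_of_contains m _ hcon, List.map_map]
      congr 1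
      · apply List.map_congr_left
        intro q hq
        by_cases hq1 : q.1 = p.1
        · have hq2 : q.2 = prev := by
            have := PySem.Dict.get?_of_mem_items m hq hm
            rw [hq1, hget] at this
            exact (Option.some.injEq _ _).mp this.symm
          simp [hq1, hq2, hrfind]
        · have hne : (q.1 == p.1) = false := by simpa using hq1
          have hne' : (p.1 == q.1) = false := by simpa using Ne.symm hq1
          simp [hq1, hne']
      · have hfeq : rest.filter (fun r => !(m.insert p.1 (g prev p)).contains r.1)
            = rest.filter (fun r => !m.contains r.1) := by
          apply List.filter_congr
          intro r hr
          have hrne : r.1 ≠ p.1 := by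
            intro hcon'
            exact hpnotin (hcon' ▸ List.mem_map_of_mem hr)
          rw [PySem.Dict.contains_insert]
          simp [hrne]
        rw [hfeq, List.filter_cons, hcon]
        simp
    | none =>
      have hcon : m.contains p.1 = false := by
        rw [PySem.Dict.contains_eq_isSome_get?, hget]; rfl
      have hpnotm : ∀ q ∈ m.items, (p.1 == q.1) = false := by
        intro q hq
        have hqk : q.1 ∈ m.keys := PySem.Dict.mem_keys_of_mem_items m hq
        rw [PySem.Dict.contains_eq_decide_mem_keys] at hcon
        have hnk : p.1 ∉ m.keys := by simpa using hcon
        simpa using fun hcon' => hnk (by rw [hcon']; exact hqk)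
      simp only [hget]
      rw [ih (m.insert p.1 (h0 p)) (PySem.Dict.nodup_keys_insert m p.1 _ hm) hpr]
      rw [PySem.Dict.items_insert_of_not_contains m _ hcon, List.map_append]
      have hfeq : rest.filter (fun r => !(m.insert p.1 (h0 p)).contains r.1)
          = rest.filter (fun r => !m.contains r.1) := by
        apply List.filter_congr
        intro r hr
        have hrne : r.1 ≠ p.1 := by
          intro hcon'
          exact hpnotin (hcon' ▸ List.mem_map_of_mem hr)
        rw [PySem.Dict.contains_insert]
        simp [hrne]
      have hmap1 : m.items.map (fun q =>
          match (p :: rest).find? (fun r => r.1 == q.1) with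
          | some r => (q.1, g q.2 r)
          | none => q)
          = m.items.map (fun q =>
          match rest.find? (fun r => r.1 == q.1) with
          | some r => (q.1, g q.2 r)
          | none => q) := by
        apply List.map_congr_left
        intro q hq
        simp [hpnotm q hq]
      rw [hfeq, hmap1, List.filter_cons]
      simp [hcon, hrfind]

theorem pMSA_paired_and_unpaired_spec' (dict1 dict2 : List (String × List String)) (q1 q2 : Int) :
    pMSA_paired_and_unpaired dict1 dict2 q1 q2 = pMSA_paired_and_unpaired_alt dict1 dict2 q1 q2 := by
  unfold pMSA_paired_and_unpaired pMSA_paired_and_unpaired_alt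
  set d1 := PySem.Dict.ofList dict1 with hd1
  set d2 := PySem.Dict.ofList dict2 with hd2
  set gap1 := pvStrTimes "-" q1 with hgap1
  set gap2 := pvStrTimes "-" q2 with hgap2
  have hnd1 : d1.keys.Nodup := PySem.Dict.nodup_keys_ofList dict1
  have hnd2 : d2.keys.Nodup := PySem.Dict.nodup_keys_ofList dict2
  -- ===== A side =====
  set vA : String → List String := fun code =>
    if d2.contains code then
      [PySem.List.pyGetD (d1.getD code []) 0 "" ++ "__" ++ PySem.List.pyGetD (d2.getD code []) 0 "",
       PySem.List.pyGetD (d1.getD code []) 1 "" ++ PySem.List.pyGetD (d2.getD code []) 1 ""]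
    else
      [PySem.List.pyGetD (d1.getD code []) 0 "" ++ "__",
       PySem.List.pyGetD (d1.getD code []) 1 "" ++ gap2] with hvA
  have hbranch : (fun (pMSA : PySem.Dict String (List String)) code =>
      if d2.contains code then
        pMSA.insert code
          [PySem.List.pyGetD (d1.getD code []) 0 "" ++ "__" ++ PySem.List.pyGetD (d2.getD code []) 0 "",
           PySem.List.pyGetD (d1.getD code []) 1 "" ++ PySem.List.pyGetD (d2.getD code []) 1 ""]
      else
        pMSA.insert code
          [PySem.List.pyGetD (d1.getD code []) 0 "" ++ "__",
           PySem.List.pyGetD (d1.getD code []) 1 "" ++ gap2])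
      = (fun (pMSA : PySem.Dict String (List String)) code => pMSA.insert (id code) (vA code)) := by
    funext pMSA code
    rw [hvA]
    by_cases h : d2.contains code = true <;> simp [h]
  have hA1 := PySem.Dict.items_foldl_insert_fresh (l := d1.keys) (k := id) (v := vA)
      (d := PySem.Dict.empty) (by simp) (by simpa using hnd1)
  simp only [id] at hA1
  dsimp only
  rw [hbranch, ← List.foldl_filter]
  set gA : String → List String :=
    fun code => ["__" ++ PySem.List.pyGetD (d2.getD code []) 0 "",
                 gap1 ++ PySem.List.pyGetD (d2.getD code []) 1 ""] with hgA
  set m1 := d1.keys.foldl (fun (pMSA : PySem.Dict String (List String)) code =>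
      pMSA.insert (id code) (vA code)) PySem.Dict.empty with hm1
  have hm1items : m1.items = d1.keys.map (fun c => (c, vA c)) := by simpa using hA1
  have hm1keys : m1.keys = d1.keys := by
    show m1.items.map (·.1) = d1.keys
    simp [hm1items, Function.comp_def]
  have hfresh2 : ∀ c ∈ d2.keys.filter (fun c => !d1.contains c), m1.contains c = false := by
    intro c hc
    rw [List.mem_filter] at hc
    have hc2 : d1.contains c = false := by simpa using hc.2
    rw [PySem.Dict.contains_eq_decide_mem_keys] at hc2 ⊢
    rw [hm1keys]; exact hc2
  have hA2 := PySem.Dict.items_foldl_insert_fresh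
      (l := d2.keys.filter (fun c => !d1.contains c)) (k := id) (v := gA) (d := m1)
      hfresh2 (by simpa using hnd2.filter _)
  simp only [id] at hA2
  rw [hA2, hm1items]
  -- ===== B side =====
  set L := d1.items.map (fun p =>
      (p.1, [PySem.List.pyGetD p.2 0 "" ++ "__", PySem.List.pyGetD p.2 1 "" ++ gap2])) with hL
  have hLfst : L.map (·.1) = d1.keys := by rw [hL, List.map_map]; rfl
  have hLnd : (L.map (·.1)).Nodup := by rw [hLfst]; exact hnd1
  set seeded := PySem.Dict.ofList L with hseed
  have hseeditems : seeded.items = L := pvItems_ofList_nodup L hLnd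
  have hseedkeys : seeded.keys = d1.keys := by
    show seeded.items.map (·.1) = d1.keys
    rw [hseeditems, hLfst]
  have hseednd : seeded.keys.Nodup := by rw [hseedkeys]; exact hnd1
  rw [pvFoldUpsert
      (fun prev p => [PySem.List.pyGetD prev 0 "" ++ PySem.List.pyGetD p.2 0 "",
        pvTrim (PySem.List.pyGetD prev 1 "") gap2 ++ PySem.List.pyGetD p.2 1 ""])
      (fun p => ["__" ++ PySem.List.pyGetD p.2 0 "", gap1 ++ PySem.List.pyGetD p.2 1 ""])
      d2.items seeded hseednd (by simpa using hnd2)]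
  rw [hseeditems]
  congr 1
  · -- patched half = A's first loop
    rw [hL, PySem.Dict.items_eq_map_keys d1 hnd1 ([] : List String), List.map_map, List.map_map]
    apply List.map_congr_left
    intro c hc
    simp only [Function.comp]
    by_cases h : d2.contains c = true
    · have hs : (d2.get? c).isSome := by rw [← PySem.Dict.contains_eq_isSome_get?, h]
      obtain ⟨v2, hv2⟩ := Option.isSome_iff_exists.mp hs
      have hfind : d2.items.find? (fun p => p.1 == c) = some (c, v2) := by
        have h' := hv2
        rw [PySem.Dict.get?] at h'
        cases hf : d2.items.find? (fun p => p.1 == c) with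
        | none => rw [hf] at h'; simp at h'
        | some r =>
          rw [hf] at h'
          have hr2 : r.2 = v2 := by simpa using h'
          have hr1 : r.1 = c := by
            have := List.find?_some hf
            simpa using this
          rw [← hr1, ← hr2]
      have hgd2 : d2.getD c [] = v2 := PySem.Dict.getD_of_get?_eq_some d2 [] hv2
      rw [hfind]
      simp [hvA, h, hgd2, PySem.List.pyGetD_ofNat', pvTrim_append]
    · have h' : d2.contains c = false := by simpa using h
      have hnone : d2.get? c = none := by
        have hh := PySem.Dict.contains_eq_isSome_get? d2 c
        rw [h'] at hh
        exact Option.not_isSome_iff_eq_none.mp (by rw [← hh]; simp)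
      have hfind : d2.items.find? (fun p => p.1 == c) = none := by
        have h2 := hnone
        rw [PySem.Dict.get?] at h2
        cases hf : d2.items.find? (fun p => p.1 == c) with
        | none => rfl
        | some r => rw [hf] at h2; simp at h2
      rw [hfind]
      simp [hvA, h']
  · -- fresh half = A's second loop
    have hcontains : ∀ p : String × List String, seeded.contains p.1 = d1.contains p.1 := by
      intro p
      rw [PySem.Dict.contains_eq_decide_mem_keys, PySem.Dict.contains_eq_decide_mem_keys,
        hseedkeys]
    have hfeq : d2.items.filter (fun p => !seeded.contains p.1)
        = d2.items.filter (fun p => !d1.contains p.1) := by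
      apply List.filter_congr
      intro p _
      rw [hcontains]
    rw [hfeq, PySem.Dict.items_eq_map_keys d2 hnd2 ([] : List String), List.filter_map,
      List.map_map]
    apply List.map_congr_left
    intro c hc
    rfl

-- ===== VERDICT =====
theorem pMSA_paired_and_unpaired_spec : Claim_equal_pMSA_paired_and_unpaired := by
  intro dict1 dict2 q1 q2 _ _
  exact pMSA_paired_and_unpaired_spec' dict1 dict2 q1 q2
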